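-- pv_equiv track=rewrite | github.com/iiasa/accelerator_non-web_client | examples/example_job1/data_test.py | calculate_band_number
-- ===== SOURCE A (Python) =====
-- def calculate_band_number(indices, sizes):
--     """
--     Calculate the band number for a multi-dimensional array.
--
--     Parameters:
--         indices (list): A list of indices corresponding to the band dimensions.
--         sizes (list): A list of sizes for each of the band dimensions.
--
--     Returns:
--         int: The calculated band number.
--     """
--     N_B = len(indices)  # Number of band dimensions
--     band_number = 0
--
--     for j in range(N_B):
--         # Calculate the product of sizes for the remaining dimensions
--         product = 1
--         for k in range(j + 1, N_B):
--             product *= sizes[k]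
--
--         band_number += indices[j] * product
--
--     return band_number
-- ===== SOURCE B (Python) =====
-- def calculate_band_number(indices, sizes):
--     # Single forward Horner pass: band = (...(i0*s1 + i1)*s2 + i2)...
--     band = 0
--     for j, idx in enumerate(indices):
--         if j:
--             band *= sizes[j]
--         band += idx
--     return band
-- ===== Notes on version B (the rewrite author's own statement) =====
-- stated objective: faster
-- what changed: Replaced the nested loop that recomputes a suffix product of sizes for every index with a single forward Horner pass (band = band*sizes[j] + indices[j]).
import Mathlib
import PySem

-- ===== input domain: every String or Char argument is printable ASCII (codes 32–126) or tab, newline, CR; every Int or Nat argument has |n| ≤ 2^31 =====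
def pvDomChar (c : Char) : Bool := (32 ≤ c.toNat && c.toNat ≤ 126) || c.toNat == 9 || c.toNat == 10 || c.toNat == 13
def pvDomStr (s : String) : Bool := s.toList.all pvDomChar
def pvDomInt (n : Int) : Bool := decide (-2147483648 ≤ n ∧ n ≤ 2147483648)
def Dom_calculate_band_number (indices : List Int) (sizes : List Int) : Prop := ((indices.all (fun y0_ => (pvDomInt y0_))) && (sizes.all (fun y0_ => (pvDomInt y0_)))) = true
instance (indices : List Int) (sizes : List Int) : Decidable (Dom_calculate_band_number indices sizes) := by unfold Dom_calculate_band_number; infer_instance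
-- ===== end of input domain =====

-- B replaces A's quadratic nested suffix-product loop with a single forward Horner pass (same result, O(n) instead of O(n^2)).


-- ===== PORT A =====
-- literal port of A: for j in range(N_B): inner loop multiplies sizes[k] for k in range(j+1, N_B)
def calculate_band_number (indices : List Int) (sizes : List Int) : Int :=
  let NB : Int := indices.length
  (PySem.List.pyRange 0 NB 1).foldl
    (fun band j =>
      let product := (PySem.List.pyRange (j + 1) NB 1).foldl
        (fun p k => p * PySem.List.pyGetD sizes k 0) 1
      band + PySem.List.pyGetD indices j 0 * product) 0

-- ===== PORT B =====
-- literal port of B: for j, idx in enumerate(indices): if j: band *= sizes[j]; band += idx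
def calculate_band_number_alt (indices : List Int) (sizes : List Int) : Int :=
  (PySem.List.enumerate indices 0).foldl
    (fun band p =>
      (if p.1 ≠ 0 then band * PySem.List.pyGetD sizes p.1 0 else band) + p.2) 0

-- ===== PRECONDITION & SPEC =====
-- A raises IndexError iff len(indices) ≥ 2 and len(sizes) < len(indices) (it reads sizes[1..N_B-1]); Pre_ excludes exactly those inputs.
def Pre_calculate_band_number (indices : List Int) (sizes : List Int) : Prop :=
  indices.length ≤ 1 ∨ indices.length ≤ sizes.length
instance (indices : List Int) (sizes : List Int) : Decidable (Pre_calculate_band_number indices sizes) := by unfold Pre_calculate_band_number; infer_instance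
def pvWitness_calculate_band_number : List Int × List Int := ([2, 3], [7, 5])

def Spec_calculate_band_number (indices : List Int) (sizes : List Int) (out : Int) : Prop := out = calculate_band_number_alt indices sizes
instance (indices : List Int) (sizes : List Int) (out : Int) : Decidable (Spec_calculate_band_number indices sizes out) := by unfold Spec_calculate_band_number; infer_instance

-- ===== CLAIM (what is proved, stated in full; the proofs are below) =====
def Claim_equal_calculate_band_number : Prop := ∀ (indices : List Int) (sizes : List Int), Dom_calculate_band_number indices sizes → Pre_calculate_band_number indices sizes → Spec_calculate_band_number indices sizes (calculate_band_number indices sizes)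

-- ===== LEMMAS AND PROOFS =====

-- A's loop, with the shared upper bound n abstracted out
def aF (indices sizes : List Int) (n : Nat) : Int :=
  (PySem.List.pyRange 0 (n : Int) 1).foldl
    (fun band j => band + PySem.List.pyGetD indices j 0 *
      (PySem.List.pyRange (j + 1) (n : Int) 1).foldl
        (fun p k => p * PySem.List.pyGetD sizes k 0) 1) 0

-- B's loop over the index range
def bF (indices sizes : List Int) (n : Nat) : Int :=
  (PySem.List.pyRange 0 (n : Int) 1).foldl
    (fun band j =>
      (if j ≠ 0 then band * PySem.List.pyGetD sizes j 0 else band) +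
        PySem.List.pyGetD indices j 0) 0

theorem aF_succ (indices sizes : List Int) (n : Nat) :
    aF indices sizes (n + 1) =
      aF indices sizes n * PySem.List.pyGetD sizes (n : Int) 0 +
        PySem.List.pyGetD indices (n : Int) 0 := by
  unfold aF
  have hc : ((n + 1 : Nat) : Int) = (n : Int) + 1 := by push_cast; ring
  rw [hc, PySem.List.pyRange_one_succ_right (by positivity), List.foldl_append]
  simp only [List.foldl_cons, List.foldl_nil]
  have hP : PySem.List.pyRange ((n : Int) + 1) ((n : Int) + 1) 1 = [] :=
    PySem.List.pyRange_one_eq_nil le_rfl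
  rw [hP]
  simp only [List.foldl_nil, mul_one]
  congr 1
  have hstep :
      (PySem.List.pyRange 0 (n : Int) 1).foldl
        (fun band j => band + PySem.List.pyGetD indices j 0 *
          (PySem.List.pyRange (j + 1) ((n : Int) + 1) 1).foldl
            (fun p k => p * PySem.List.pyGetD sizes k 0) 1) 0 =
      (PySem.List.pyRange 0 (n : Int) 1).foldl
        (fun band j => band + (PySem.List.pyGetD indices j 0 *
          (PySem.List.pyRange (j + 1) (n : Int) 1).foldl
            (fun p k => p * PySem.List.pyGetD sizes k 0) 1) * PySem.List.pyGetD sizes (n : Int) 0) 0 := by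
    apply PySem.List.foldl_congr_mem
    intro acc j hj
    have hj' := (PySem.List.mem_pyRange_one).1 hj
    rw [PySem.List.pyRange_one_succ_right (by omega), List.foldl_append]
    simp only [List.foldl_cons, List.foldl_nil]
    ring
  rw [hstep, PySem.List.foldl_add, PySem.List.foldl_add, List.sum_map_mul_right]
  ring

theorem bF_succ (indices sizes : List Int) (n : Nat) :
    bF indices sizes (n + 1) =
      (if (n : Int) ≠ 0 then bF indices sizes n * PySem.List.pyGetD sizes (n : Int) 0
        else bF indices sizes n) + PySem.List.pyGetD indices (n : Int) 0 := by
  unfold bF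
  have hc : ((n + 1 : Nat) : Int) = (n : Int) + 1 := by push_cast; ring
  rw [hc, PySem.List.pyRange_one_succ_right (by positivity), List.foldl_append]
  simp only [List.foldl_cons, List.foldl_nil]

theorem aF_eq_bF (indices sizes : List Int) (n : Nat) :
    aF indices sizes n = bF indices sizes n := by
  induction n with
  | zero => rfl
  | succ n ih =>
    rw [aF_succ, bF_succ, ← ih]
    by_cases hn : (n : Int) = 0
    · have hn0 : n = 0 := by exact_mod_cast hn
      subst hn0
      have h0 : aF indices sizes 0 = 0 := rfl
      rw [if_neg (by simp), h0, zero_mul]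
    · rw [if_pos hn]

theorem a_eq_aF (indices sizes : List Int) :
    calculate_band_number indices sizes = aF indices sizes indices.length := rfl

theorem b_eq_bF (indices sizes : List Int) :
    calculate_band_number_alt indices sizes = bF indices sizes indices.length := by
  unfold calculate_band_number_alt bF
  rw [PySem.List.enumerate_eq_map_pyRange (d := 0), List.foldl_map]
  rfl

-- ===== VERDICT (by name: the statement is the Claim_ definition above) =====
theorem calculate_band_number_spec : Claim_equal_calculate_band_number := by
  intro indices sizes _ _
  unfold Spec_calculate_band_number
  rw [a_eq_aF, b_eq_bF, aF_eq_bF]
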